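-- pv_equiv track=rewrite | github.com/dayds/aljalddakggalco | sua/w2_2/programmers_w2_2_4.py | solution
-- ===== SOURCE A (Python) =====
-- def solution(n):
--     answer = 1
--     f = 1
--     while f <= n:
--         answer += 1
--         f = f *answer
--     answer = answer -1
--     return answer
-- ===== SOURCE B (Python) =====
-- def solution(n):
--     answer = 0
--     m = n
--     i = 1
--     while m >= 1:
--         answer += 1
--         i += 1
--         m = m // i
--     return answer
-- ===== Notes on version B (the rewrite author's own statement) =====
-- stated objective: alternative
-- what changed: Instead of growing a factorial f=k! and comparing f<=n, B keeps a shrinking quotient m=n//k!, obtained by successive floor-divisions by an increasing counter (using floor(floor(x/a)/b)=floor(x/(ab))), and counts how many divisions keep m positive.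
import Mathlib
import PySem

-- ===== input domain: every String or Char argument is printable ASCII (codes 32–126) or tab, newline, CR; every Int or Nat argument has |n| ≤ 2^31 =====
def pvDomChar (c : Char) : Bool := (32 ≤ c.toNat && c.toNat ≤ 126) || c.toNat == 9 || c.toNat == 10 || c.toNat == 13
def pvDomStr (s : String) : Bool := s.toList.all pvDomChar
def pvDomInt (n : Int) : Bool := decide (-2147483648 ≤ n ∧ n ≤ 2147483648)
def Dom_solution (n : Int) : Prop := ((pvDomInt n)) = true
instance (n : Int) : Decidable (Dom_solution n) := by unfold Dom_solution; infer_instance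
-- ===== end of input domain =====

-- B replaces A's growing factorial (f = k!, compared with n) by a shrinking quotient
-- (m = n // k!, obtained by successive floor-divisions); alternative algorithm, same cost.

-- ===== PORT A =====
-- termination facts for the ports' loops, cited by name in decreasing_by
theorem solLoopA_hf {f a : Int} (hf : 1 ≤ f) (ha : 1 ≤ a) : 1 ≤ f * (a + 1) :=
  le_trans hf (le_mul_of_one_le_right (le_trans zero_le_one hf)
    (le_trans ha (le_add_of_nonneg_right zero_le_one)))

theorem solLoopA_ha {a : Int} (ha : 1 ≤ a) : 1 ≤ a + 1 :=
  le_trans ha (le_add_of_nonneg_right zero_le_one)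

theorem solLoopA_dec {n f a : Int} (hf : 1 ≤ f) (ha : 1 ≤ a) (h : f ≤ n) :
    (n + 1 - f * (a + 1)).toNat < (n + 1 - f).toNat :=
  (Int.toNat_lt_toNat (sub_pos.mpr (lt_of_le_of_lt h (lt_add_one n)))).mpr
    (sub_lt_sub_left (lt_mul_of_one_lt_right (lt_of_lt_of_le zero_lt_one hf)
      (lt_of_le_of_lt ha (lt_add_one a))) (n + 1))

-- A's while loop: state (answer, f); guard f ≤ n; the Prop arguments record the loop
-- invariants 1 ≤ f and 1 ≤ answer needed only for termination.
def solLoopA (n answer f : Int) (hf : 1 ≤ f) (ha : 1 ≤ answer) : Int :=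
  if _hg : f ≤ n then
    solLoopA n (answer + 1) (f * (answer + 1)) (solLoopA_hf hf ha) (solLoopA_ha ha)
  else answer
termination_by (n + 1 - f).toNat
decreasing_by exact solLoopA_dec hf ha _hg

def solution (n : Int) : Int := solLoopA n 1 1 le_rfl le_rfl - 1

-- ===== PORT B =====
-- B's while loop: state (answer, m, i); guard m ≥ 1; body answer += 1; i += 1; m = m // i.
theorem solLoopB_hi {i : Int} (hi : 1 ≤ i) : 1 ≤ i + 1 :=
  le_trans hi (le_add_of_nonneg_right zero_le_one)

theorem solLoopB_dec {m i : Int} (hi : 1 ≤ i) (h : 1 ≤ m) :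
    (PySem.Int.floordiv m (i + 1)).toNat < m.toNat :=
  (Int.toNat_lt_toNat (lt_of_lt_of_le zero_lt_one h)).mpr
    ((PySem.Int.floordiv_lt_iff_lt_mul (lt_of_lt_of_le zero_lt_one (solLoopB_hi hi))).mpr
      (lt_mul_of_one_lt_right (lt_of_lt_of_le zero_lt_one h) (lt_of_le_of_lt hi (lt_add_one i))))

def solLoopB (answer m i : Int) (hi : 1 ≤ i) : Int :=
  if _hg : 1 ≤ m then
    solLoopB (answer + 1) (PySem.Int.floordiv m (i + 1)) (i + 1) (solLoopB_hi hi)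
  else answer
termination_by m.toNat
decreasing_by exact solLoopB_dec hi _hg

def solution_alt (n : Int) : Int := solLoopB 0 n 1 le_rfl

-- ===== PRECONDITION & SPEC =====
def Spec_solution (n : Int) (out : Int) : Prop := out = solution_alt n
instance (n : Int) (out : Int) : Decidable (Spec_solution n out) := by unfold Spec_solution; infer_instance

-- ===== CLAIM (what is proved, stated in full; the proofs are below) =====
def Claim_equal_solution : Prop := ∀ (n : Int), Dom_solution n → Spec_solution n (solution n)

-- ===== LEMMAS AND PROOFS =====

-- Loop correspondence: when A's state is (answer = a, f), B's state is
-- (answer = a - 1, m = n // f, i = a); they step in lock-step, since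
-- (n // f) // (a+1) = n // (f*(a+1)) and (1 ≤ n // f ↔ f ≤ n) for 1 ≤ f.
theorem solLoop_eq (n f a : Int) (hf : 1 ≤ f) (ha : 1 ≤ a) :
    solLoopA n a f hf ha - 1 = solLoopB (a - 1) (PySem.Int.floordiv n f) a ha := by
  fun_induction solLoopA n a f hf ha with
  | case1 a f hf ha h ih =>
    have hfpos : (0 : Int) < f := by omega
    have hguard : 1 ≤ PySem.Int.floordiv n f :=
      (PySem.Int.le_floordiv_iff_mul_le hfpos).mpr (by omega)
    rw [solLoopB, dif_pos hguard]
    have hdd : PySem.Int.floordiv (PySem.Int.floordiv n f) (a + 1)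
        = PySem.Int.floordiv n (f * (a + 1)) := by
      simp only [PySem.Int.floordiv]
      exact Int.fdiv_fdiv_eq_fdiv_mul n (by omega) (by omega)
    rw [hdd] at *
    have : a - 1 + 1 = a + 1 - 1 := by ring
    rw [this]
    exact ih
  | case2 a f hf ha h =>
    have hfpos : (0 : Int) < f := by omega
    have hguard : ¬ 1 ≤ PySem.Int.floordiv n f := by
      intro hc
      have hfn := (PySem.Int.le_floordiv_iff_mul_le hfpos).mp hc
      rw [one_mul] at hfn
      exact h hfn
    rw [solLoopB, dif_neg hguard]

-- ===== VERDICT (by name: the statement is the Claim_ definition above) =====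
theorem solution_spec : Claim_equal_solution := by
  intro n _
  unfold Spec_solution solution solution_alt
  have h := solLoop_eq n 1 1 le_rfl le_rfl
  simpa [PySem.Int.floordiv, Int.fdiv_one] using h
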